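-- pv_equiv track=rewrite | github.com/ameliepcd/Projet_S2 | analyse_tweet_vrac.py | recup_nb_mots
-- ===== SOURCE A (Python) =====
-- def mot_plus_frequent2(nb_frequence):
--     # prend en entrée un dictionnaire (clé = mot ; valeur = occurence) sortant de la fction frequence_word pour récupérer
--     #les mots les plus fréquents (si ils existent)
--     if len(nb_frequence)==0:
--         return()
--     else:
--         le_plus_fréquent=[]
--         max_occur=1
--         for cle in nb_frequence.keys():
--             if nb_frequence[cle]>max_occur:
--                 max_occur=nb_frequence[cle]
--         for cle in nb_frequence:
--             if nb_frequence[cle]==max_occur: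
--                 le_plus_fréquent.append(cle)
--         ###on enlève les mots pris du dico d'entrée si on a besoin d'utiliser pls fois cette fonction
--         for word in le_plus_fréquent:
--             del nb_frequence[word]
--
--     #on renvoie les mots avec la plus grande occurence et on les supprime du dico
--     return(le_plus_fréquent, nb_frequence)
--
-- def recup_nb_mots(nb_frequence,nombre):
--     ### prend en entrée le dico de nb_frequence
--     ###permet de récuperer le nombre de mots voulus en itérant sur la fonction mot_plus_frequent(nb_frequence)
--     a_recup = nombre
--     liste_frequent=[]
--     while len(liste_frequent) < a_recup:
--         new=mot_plus_frequent2(nb_frequence)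
--         liste_frequent+= new[0]
--         nb_frequence=new[1]
--     ###on renvoie la liste correspondante
--     return(liste_frequent)
-- ===== SOURCE B (Python) =====
-- def recup_nb_mots(nb_frequence, nombre):
--     # bucket words by frequency once, then emit buckets by descending frequency
--     # until at least `nombre` words are collected (does not mutate the input dict)
--     groups = {}
--     for w, v in nb_frequence.items():
--         if v >= 1:
--             groups.setdefault(v, []).append(w)
--     res = []
--     for v in sorted(groups, reverse=True):
--         if len(res) >= nombre:
--             break
--         res += groups[v]
--     return res
-- ===== Notes on version B (the rewrite author's own statement) =====
-- stated objective: alternative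
-- what changed: A repeatedly scans the whole dict for the current maximum occurrence and deletes the collected words, one round per frequency level; B buckets the words by occurrence in a single pass, sorts the distinct occurrences once, and concatenates buckets in descending order until the count is reached, without mutating the input.
import Mathlib
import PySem

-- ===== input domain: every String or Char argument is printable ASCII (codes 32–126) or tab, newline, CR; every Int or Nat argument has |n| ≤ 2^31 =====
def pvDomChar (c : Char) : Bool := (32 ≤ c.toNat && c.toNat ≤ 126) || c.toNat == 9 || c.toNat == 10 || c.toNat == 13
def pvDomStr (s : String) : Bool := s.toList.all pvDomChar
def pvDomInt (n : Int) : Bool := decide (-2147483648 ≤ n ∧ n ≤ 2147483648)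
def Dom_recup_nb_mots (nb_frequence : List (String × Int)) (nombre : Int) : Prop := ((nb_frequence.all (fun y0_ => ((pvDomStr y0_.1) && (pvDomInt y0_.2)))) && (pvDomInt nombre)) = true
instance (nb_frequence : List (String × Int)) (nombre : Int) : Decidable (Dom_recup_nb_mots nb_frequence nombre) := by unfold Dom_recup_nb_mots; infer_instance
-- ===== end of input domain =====

-- B replaces A's repeated max-scan-and-delete rounds over the dict by bucketing the words
-- by occurrence in one pass and emitting buckets in descending occurrence order (objective:
-- alternative). A mutates the input dict in place (it deletes the collected words); B does
-- not: the equivalence proved here is about the RETURN value only.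

-- ===== PORT A =====
def motPlusFrequent2 (d : PySem.Dict String Int) : Option (List String × PySem.Dict String Int) :=
  if d.size == 0 then
    none  -- Python returns the empty tuple (); the caller's new[0] then raises IndexError
  else
    let maxOccur : Int := d.keys.foldl (fun m cle =>
      match d.get? cle with      -- nb_frequence[cle]; the key is present, so no KeyError
      | some v => if m < v then v else m
      | none => m) 1
    let lePlusFrequent : List String := d.keys.foldl (fun acc cle =>
      if d.get? cle == some maxOccur then acc ++ [cle] else acc) []
    let d' := lePlusFrequent.foldl (fun dd word => dd.erase word) d   -- del nb_frequence[word]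
    some (lePlusFrequent, d')

-- the while loop; fuel d.size + 1 suffices: every productive round removes ≥ 1 entry, and
-- an unproductive round leaves dict and accumulator unchanged, so the value no longer
-- changes (on such inputs Python loops forever or raises IndexError; excluded by Pre_)
def recupGo (nombre : Int) : Nat → PySem.Dict String Int → List String → List String
  | 0, _, acc => acc
  | fuel+1, d, acc =>
    if (acc.length : Int) < nombre then
      match motPlusFrequent2 d with
      | none => acc              -- Python raises IndexError here; excluded by Pre_
      | some gd => recupGo nombre fuel gd.2 (acc ++ gd.1)
    else acc

def recup_nb_mots (nb_frequence : List (String × Int)) (nombre : Int) : List String :=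
  let d := PySem.Dict.ofList nb_frequence
  recupGo nombre (d.size + 1) d []

-- ===== PORT B =====
-- the `res += groups[v]` loop (the key v is always present, so no KeyError; ported with getD)
def collectB (groups : PySem.Dict Int (List String)) (nombre : Int) : List Int → List String → List String
  | [], res => res
  | v :: rest, res =>
    if nombre ≤ (res.length : Int) then res
    else collectB groups nombre rest (res ++ groups.getD v [])

def recup_nb_mots_alt (nb_frequence : List (String × Int)) (nombre : Int) : List String :=
  let d := PySem.Dict.ofList nb_frequence
  let groups : PySem.Dict Int (List String) :=
    d.items.foldl (fun g p => if 1 ≤ p.2 then g.modify p.2 [] (fun cur => cur ++ [p.1]) else g)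
      PySem.Dict.empty                  -- groups.setdefault(v, []).append(w)
  let vs := PySem.List.sorted groups.keys (fun v => v) true   -- sorted(groups, reverse=True)
  collectB groups nombre vs []

-- ===== PRECONDITION & SPEC =====
-- Pre_ excludes exactly the inputs on which the Python A never returns: unless at least
-- `nombre` entries have an occurrence ≥ 1, A either raises IndexError (dict exhausted) or
-- loops forever (only occurrences < 1 remain).
def Pre_recup_nb_mots (nb_frequence : List (String × Int)) (nombre : Int) : Prop :=
  nombre ≤ ((((PySem.Dict.ofList nb_frequence).items.filter (fun p => decide (1 ≤ p.2))).length : Int))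
instance (nb_frequence : List (String × Int)) (nombre : Int) : Decidable (Pre_recup_nb_mots nb_frequence nombre) := by unfold Pre_recup_nb_mots; infer_instance
def pvWitness_recup_nb_mots : (List (String × Int)) × Int := ([("a", 2), ("b", 1)], 1)

def Spec_recup_nb_mots (nb_frequence : List (String × Int)) (nombre : Int) (out : List String) : Prop := out = recup_nb_mots_alt nb_frequence nombre
instance (nb_frequence : List (String × Int)) (nombre : Int) (out : List String) : Decidable (Spec_recup_nb_mots nb_frequence nombre out) := by unfold Spec_recup_nb_mots; infer_instance

-- ===== CLAIM (what is proved, stated in full; the proofs are below) =====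
def Claim_equal_recup_nb_mots : Prop := ∀ (nb_frequence : List (String × Int)) (nombre : Int), Dom_recup_nb_mots nb_frequence nombre → Pre_recup_nb_mots nb_frequence nombre → Spec_recup_nb_mots nb_frequence nombre (recup_nb_mots nb_frequence nombre)

-- ===== LEMMAS AND PROOFS =====

-- two items of a list with Nodup keys that share a key are equal
theorem pv_eq_of_fst_eq {l : List (String × Int)} (hnd : (l.map Prod.fst).Nodup)
    {p q : String × Int} (hp : p ∈ l) (hq : q ∈ l) (h : p.1 = q.1) : p = q := by
  induction l with
  | nil => cases hp
  | cons a t ih =>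
    simp only [List.map_cons, List.nodup_cons] at hnd
    rcases List.mem_cons.1 hp with rfl | hp' <;> rcases List.mem_cons.1 hq with rfl | hq'
    · rfl
    · exact absurd (h ▸ List.mem_map_of_mem (f := Prod.fst) hq') hnd.1
    · exact absurd (h ▸ List.mem_map_of_mem (f := Prod.fst) hp') (fun hc => hnd.1 hc)
    · exact ih hnd.2 hp' hq'

-- the running-max loop from a floor
theorem pv_maxfold (v : Int) (l : List (String × Int)) :
    ∀ m : Int, m ≤ v → (∀ p ∈ l, p.2 ≤ v) → (m = v ∨ ∃ p ∈ l, p.2 = v) →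
      l.foldl (fun m p => if m < p.2 then p.2 else m) m = v := by
  induction l with
  | nil => intro m _ _ hex; simpa using hex
  | cons a t ih =>
    intro m hm hall hex
    simp only [List.foldl_cons]
    have ha : a.2 ≤ v := hall a (by simp)
    refine ih _ (by split <;> omega) (fun p hp => hall p (by simp [hp])) ?_
    rcases hex with rfl | ⟨p, hp, hpv⟩
    · left; split <;> omega
    · rcases List.mem_cons.1 hp with rfl | hp'
      · left; split <;> omega
      · right; exact ⟨p, hp', hpv⟩

-- folding erase over a list of keys filters the items
theorem pv_eraseFold (ks : List String) :
    ∀ d : PySem.Dict String Int,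
      (ks.foldl (fun dd w => dd.erase w) d).items
        = d.items.filter (fun p => decide (p.1 ∉ ks)) := by
  induction ks with
  | nil => intro d; simp
  | cons k t ih =>
    intro d
    rw [List.foldl_cons, ih (d.erase k)]
    show (d.items.filter (fun p => !(p.1 == k))).filter (fun p => decide (p.1 ∉ t)) = _
    rw [List.filter_filter]
    apply List.filter_congr
    intro p _
    by_cases h1 : p.1 = k <;> by_cases h2 : p.1 ∈ t <;> simp [h1, h2]

-- A's max-occurrence loop over the keys, re-read as a loop over the items
theorem pv_max_keys_eq_items (d : PySem.Dict String Int) (hnd : d.keys.Nodup) :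
    (d.keys.foldl (fun m cle =>
        match d.get? cle with
        | some v => if m < v then v else m
        | none => m) 1)
      = d.items.foldl (fun m p => if m < p.2 then p.2 else m) 1 := by
  conv_rhs => rw [PySem.Dict.items_eq_map_keys d hnd 0]
  rw [List.foldl_map]
  apply PySem.List.foldl_congr_mem
  intro m cle hcle
  obtain ⟨v, hv⟩ : ∃ v, d.get? cle = some v := by
    cases h : d.get? cle with
    | none => exact absurd hcle ((PySem.Dict.get?_eq_none_iff_not_mem_keys d cle).1 h)
    | some v => exact ⟨v, rfl⟩
  rw [hv, PySem.Dict.getD_of_get?_eq_some d 0 hv]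

-- A's collection loop over the keys, re-read as a filter of the items
theorem pv_group_keys_eq_items (d : PySem.Dict String Int) (hnd : d.keys.Nodup) (v : Int) :
    (d.keys.foldl (fun acc cle =>
        if d.get? cle == some v then acc ++ [cle] else acc) [])
      = (d.items.filter (fun p => p.2 == v)).map Prod.fst := by
  have h2 : (d.items.foldl (fun acc p => if p.2 == v then acc ++ [p.1] else acc) [])
      = (d.items.filter (fun p => p.2 == v)).map Prod.fst := by
    simpa using PySem.List.foldl_append_if (fun p : String × Int => p.2 == v) Prod.fst d.items []
  rw [← h2]
  conv_rhs => rw [PySem.Dict.items_eq_map_keys d hnd 0]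
  rw [List.foldl_map]
  apply PySem.List.foldl_congr_mem
  intro acc cle hcle
  obtain ⟨w, hw⟩ : ∃ w, d.get? cle = some w := by
    cases h : d.get? cle with
    | none => exact absurd hcle ((PySem.Dict.get?_eq_none_iff_not_mem_keys d cle).1 h)
    | some w => exact ⟨w, rfl⟩
  rw [hw, PySem.Dict.getD_of_get?_eq_some d 0 hw]
  simp

-- a dict whose remaining occurrences are all < 1 makes no more progress
theorem pv_stall (nombre : Int) : ∀ (fuel : Nat) (d : PySem.Dict String Int) (acc : List String),
    d.keys.Nodup → (∀ p ∈ d.items, p.2 < 1) → recupGo nombre fuel d acc = acc := by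
  intro fuel
  induction fuel with
  | zero => intro d acc _ _; rfl
  | succ n ih =>
    intro d acc hnd hlt
    rw [recupGo]
    split
    · unfold motPlusFrequent2
      by_cases hz : d.size = 0
      · simp [hz]
      · have hsz : (d.size == 0) = false := by simpa using hz
        rw [hsz]
        simp only [Bool.false_eq_true, if_false]
        have hmax : (d.keys.foldl (fun m cle =>
            match d.get? cle with
            | some v => if m < v then v else m
            | none => m) 1) = 1 := by
          rw [pv_max_keys_eq_items d hnd]
          exact pv_maxfold 1 d.items 1 le_rfl (fun p hp => by have := hlt p hp; omega) (Or.inl rfl)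
        rw [hmax]
        have hgrp : (d.keys.foldl (fun acc cle =>
            if d.get? cle == some 1 then acc ++ [cle] else acc) []) = [] := by
          rw [pv_group_keys_eq_items d hnd]
          have : d.items.filter (fun p => p.2 == 1) = [] := by
            rw [List.filter_eq_nil_iff]
            intro p hp
            have := hlt p hp
            simp only [beq_iff_eq]
            omega
          rw [this]; rfl
        rw [hgrp]
        simpa using ih d acc hnd hlt
    · rfl

-- the A-side while loop follows the descending distinct occurrences, i.e. B's bucket loop
theorem pv_mainLoop (nombre : Int) :
    ∀ (vs : List Int) (fuel : Nat) (d : PySem.Dict String Int) (acc : List String)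
      (groups : PySem.Dict Int (List String)),
      d.keys.Nodup →
      vs.Pairwise (fun a b => b < a) →
      (∀ v ∈ vs, 1 ≤ v) →
      (∀ p ∈ d.items, 1 ≤ p.2 → p.2 ∈ vs) →
      (∀ v ∈ vs, ∃ p ∈ d.items, p.2 = v) →
      (∀ v ∈ vs, groups.getD v [] = (d.items.filter (fun p => p.2 == v)).map Prod.fst) →
      vs.length ≤ fuel →
      recupGo nombre fuel d acc = collectB groups nombre vs acc := by
  intro vs
  induction vs with
  | nil =>
    intro fuel d acc groups hnd _ _ hin _ _ _
    rw [collectB]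
    exact pv_stall nombre fuel d acc hnd (fun p hp => by
      by_contra h
      exact absurd (hin p hp (by omega)) (List.not_mem_nil))
  | cons v rest ih =>
    intro fuel d acc groups hnd hpair hge hin hex hgrp hfuel
    cases fuel with
    | zero => simp at hfuel
    | succ fuel =>
      rw [collectB, recupGo]
      by_cases hacc : (acc.length : Int) < nombre
      · rw [if_pos hacc, if_neg (by omega)]
        obtain ⟨pv, hpv, hpv2⟩ := hex v (List.mem_cons_self)
        have hv1 : 1 ≤ v := hge v List.mem_cons_self
        have hrest_lt : ∀ u ∈ rest, u < v := (List.pairwise_cons.1 hpair).1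
        have hnz : ¬ d.size = 0 := by
          have : d.items ≠ [] := by intro h; rw [h] at hpv; cases hpv
          simpa [PySem.Dict.size, List.length_eq_zero_iff] using this
        unfold motPlusFrequent2
        have hsz : (d.size == 0) = false := by simpa using hnz
        rw [hsz]
        simp only [Bool.false_eq_true, if_false]
        have hmax : (d.keys.foldl (fun m cle =>
            match d.get? cle with
            | some w => if m < w then w else m
            | none => m) 1) = v := by
          rw [pv_max_keys_eq_items d hnd]
          refine pv_maxfold v d.items 1 hv1 ?_ (Or.inr ⟨pv, hpv, hpv2⟩)
          intro p hp
          by_cases h1 : 1 ≤ p.2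
          · rcases List.mem_cons.1 (hin p hp h1) with h | h
            · omega
            · have := hrest_lt _ h; omega
          · omega
        rw [hmax]
        set group := (d.items.filter (fun p => p.2 == v)).map Prod.fst with hgroup_def
        rw [pv_group_keys_eq_items d hnd v]
        have hkeys : d.keys = d.items.map Prod.fst := rfl
        have hmemgrp : ∀ p ∈ d.items, (p.1 ∈ group ↔ p.2 = v) := by
          intro p hp
          constructor
          · intro hmem
            obtain ⟨q, hq, hq1⟩ := List.mem_map.1 hmem
            have hq' := List.mem_filter.1 hq
            have : p = q := pv_eq_of_fst_eq (hkeys ▸ hnd) hp hq'.1 hq1.symm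
            rw [this]
            exact beq_iff_eq.1 hq'.2
          · intro h
            exact List.mem_map_of_mem (List.mem_filter.2 ⟨hp, beq_iff_eq.2 h⟩)
        have hitems' : (group.foldl (fun dd word => dd.erase word) d).items
            = d.items.filter (fun p => !(p.2 == v)) := by
          rw [pv_eraseFold]
          apply List.filter_congr
          intro p hp
          by_cases h : p.2 = v
          · simp [h, (hmemgrp p hp).2 h]
          · have : p.1 ∉ group := fun hc => h ((hmemgrp p hp).1 hc)
            simp [h, this]
        set d' := group.foldl (fun dd word => dd.erase word) d with hd'
        have hnd' : d'.keys.Nodup := by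
          have hsub : d'.items.Sublist d.items := by
            rw [hitems']; exact List.filter_sublist
          have : (d'.items.map Prod.fst).Sublist (d.items.map Prod.fst) := hsub.map _
          exact (hkeys ▸ hnd).sublist this
        have hmem' : ∀ p, p ∈ d'.items ↔ (p ∈ d.items ∧ p.2 ≠ v) := by
          intro p
          rw [hitems', List.mem_filter]
          simp
        rw [ih fuel d' (acc ++ group) groups hnd'
          ((List.pairwise_cons.1 hpair).2)
          (fun u hu => hge u (List.mem_cons_of_mem _ hu))
          (fun p hp h1 => by
            obtain ⟨hpd, hpne⟩ := (hmem' p).1 hp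
            rcases List.mem_cons.1 (hin p hpd h1) with h | h
            · exact absurd h hpne
            · exact h)
          (fun u hu => by
            obtain ⟨p, hp, hp2⟩ := hex u (List.mem_cons_of_mem _ hu)
            exact ⟨p, (hmem' p).2 ⟨hp, by have := hrest_lt u hu; omega⟩, hp2⟩)
          (fun u hu => by
            rw [hgrp u (List.mem_cons_of_mem _ hu), hitems', List.filter_filter]
            congr 1
            apply List.filter_congr
            intro p _
            by_cases h : p.2 = u
            · have := hrest_lt u hu
              simp [h]
              omega
            · simp [h])
          (by simpa using Nat.le_of_succ_le_succ (by simpa using hfuel))]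
        rw [hgrp v List.mem_cons_self]
      · rw [if_neg hacc, if_pos (by omega)]

theorem recup_nb_mots_spec_aux (nb_frequence : List (String × Int)) (nombre : Int) :
    recup_nb_mots nb_frequence nombre = recup_nb_mots_alt nb_frequence nombre := by
  unfold recup_nb_mots recup_nb_mots_alt
  set d0 := PySem.Dict.ofList nb_frequence with hd0
  set L := d0.items with hL
  set F := L.filter (fun p => decide (1 ≤ p.2)) with hF
  have hfold : (L.foldl (fun g p =>
      if 1 ≤ p.2 then g.modify p.2 [] (fun cur => cur ++ [p.1]) else g) PySem.Dict.empty)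
      = F.foldl (fun g p => g.modify p.2 [] (fun cur => cur ++ [p.1])) PySem.Dict.empty := by
    exact PySem.List.foldl_ite_eq_foldl_filter (fun p : String × Int => 1 ≤ p.2)
      (fun g p => g.modify p.2 [] (fun cur => cur ++ [p.1])) L PySem.Dict.empty
  set groups := L.foldl (fun g p =>
      if 1 ≤ p.2 then g.modify p.2 [] (fun cur => cur ++ [p.1]) else g) PySem.Dict.empty
    with hgroups
  have hkeysG : groups.keys = PySem.Set.ofList (F.map (fun p => p.2)) := by
    rw [hfold,
      PySem.Dict.keys_foldl_modify_key F (fun p => p.2) [] (fun _ p => fun cur => cur ++ [p.1])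
        PySem.Dict.empty]
    rw [PySem.Dict.keys_empty, PySem.Set.ofList_eq_foldl]
    rfl
  have hndK : groups.keys.Nodup := by
    rw [hkeysG]; exact PySem.Set.nodup_ofList _
  set vs := PySem.List.sorted groups.keys (fun v => v) true with hvs
  have hperm : vs.Perm groups.keys := PySem.List.sorted_perm _ _ _
  have hmemvs : ∀ v, v ∈ vs ↔ v ∈ F.map (fun p => p.2) := by
    intro v
    rw [hperm.mem_iff, hkeysG, PySem.Set.mem_ofList]
  have hpair : vs.Pairwise (fun a b => b < a) := by
    have h1 : vs.Pairwise (fun a b => b ≤ a) :=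
      PySem.List.sorted_pairwise_rev groups.keys (fun v => v)
    have h2 : vs.Nodup := hperm.nodup_iff.2 hndK
    exact (h1.and h2).imp (fun h => lt_of_le_of_ne h.1 (Ne.symm h.2))
  have hgrpD : ∀ v ∈ vs, groups.getD v [] = (L.filter (fun p => p.2 == v)).map Prod.fst := by
    intro v hv
    have hv1 : 1 ≤ v := by
      obtain ⟨p, hp, hp2⟩ := List.mem_map.1 ((hmemvs v).1 hv)
      have := List.mem_filter.1 hp
      have := of_decide_eq_true this.2
      omega
    have hswap : (F.foldl (fun g p => g.modify p.2 [] (fun cur => cur ++ [p.1]))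
        PySem.Dict.empty)
        = (F.map (fun p => (p.2, p.1))).foldl
            (fun g q => g.modify q.1 [] (fun cur => cur ++ [q.2])) PySem.Dict.empty := by
      rw [List.foldl_map]
    rw [hfold, hswap,
      PySem.Dict.getD_foldl_modify_append (F.map (fun p => (p.2, p.1))) PySem.Dict.empty v]
    rw [List.filter_map, List.map_map]
    have hFF : F.filter ((fun q : Int × String => q.1 == v) ∘ (fun p : String × Int => (p.2, p.1)))
        = L.filter (fun p => p.2 == v) := by
      rw [hF, List.filter_filter]
      apply List.filter_congr
      intro p _
      by_cases h : p.2 = v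
      · simp [h]; omega
      · simp [h]
    rw [hFF]
    simp [Function.comp]
  have hfuel : vs.length ≤ d0.size + 1 := by
    have h1 : vs.length = groups.keys.length := hperm.length_eq
    have h2 : groups.keys.length ≤ (F.map (fun p => p.2)).length := by
      rw [hkeysG]
      exact ((PySem.Set.nodup_ofList _).subperm
        (fun x hx => (PySem.Set.mem_ofList _ x).1 hx)).length_le
    have h3 : F.length ≤ L.length := List.length_filter_le _ _
    have h4 : d0.size = L.length := rfl
    simp only [List.length_map] at h2
    omega
  refine pv_mainLoop nombre vs (d0.size + 1) d0 [] groups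
    (PySem.Dict.nodup_keys_ofList nb_frequence) hpair
    (fun v hv => ?_)
    (fun p hp h1 => ?_)
    (fun v hv => ?_) hgrpD hfuel
  · obtain ⟨p, hp, hp2⟩ := List.mem_map.1 ((hmemvs v).1 hv)
    have := of_decide_eq_true (List.mem_filter.1 hp).2
    omega
  · exact (hmemvs p.2).2 (List.mem_map_of_mem (List.mem_filter.2 ⟨hp, decide_eq_true h1⟩))
  · obtain ⟨p, hp, hp2⟩ := List.mem_map.1 ((hmemvs v).1 hv)
    exact ⟨p, (List.mem_filter.1 hp).1, hp2⟩

-- ===== VERDICT (by name: the statement is the Claim_ definition above) =====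
theorem recup_nb_mots_spec : Claim_equal_recup_nb_mots := by
  intro nb nombre _ _
  show recup_nb_mots nb nombre = recup_nb_mots_alt nb nombre
  exact recup_nb_mots_spec_aux nb nombre
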